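-- pv_equiv track=rewrite | github.com/GustosRepo/medocr | MEDOCR/archive/old-ocr-worker/batch_cover_generator.py | count_forms_needed
-- ===== SOURCE A (Python) =====
-- from typing import List, Dict, Any
--
-- def count_forms_needed(batch_results: List[Dict[str, Any]]) -> Dict[str, int]:
--     """Count the different types of forms needed"""
--     counts = {
--         'insurance_verification': 0,
--         'authorization_requests': 0,
--         'uts_referrals': 0,
--         'provider_followup': 0,
--         'patient_contact': 0
--     }
--
--     for result in batch_results:
--         flags = result.get('flags', [])
--
--         # Count based on flags
--         if 'MISSING_CHART_NOTES' in flags: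
--             counts['insurance_verification'] += 1
--
--         if 'AUTHORIZATION_REQUIRED' in flags:
--             counts['authorization_requests'] += 1
--
--         if any(flag in flags for flag in ['INSURANCE_NOT_ACCEPTED', 'PROMINENCE_CONTRACT_ENDED']):
--             counts['uts_referrals'] += 1
--
--         if any(flag in flags for flag in ['TITRATION_REQUIRES_CLINICAL_REVIEW', 'CONTRADICTORY_INFO', 'WRONG_TEST_ORDERED']):
--             counts['provider_followup'] += 1
--
--         if 'MISSING_PATIENT_INFO' in flags:
--             counts['patient_contact'] += 1
--
--     return counts
-- ===== SOURCE B (Python) =====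
-- from typing import List, Dict, Any
--
-- CATEGORIES = {
--     'insurance_verification': ['MISSING_CHART_NOTES'],
--     'authorization_requests': ['AUTHORIZATION_REQUIRED'],
--     'uts_referrals': ['INSURANCE_NOT_ACCEPTED', 'PROMINENCE_CONTRACT_ENDED'],
--     'provider_followup': ['TITRATION_REQUIRES_CLINICAL_REVIEW', 'CONTRADICTORY_INFO', 'WRONG_TEST_ORDERED'],
--     'patient_contact': ['MISSING_PATIENT_INFO'],
-- }
--
-- def count_forms_needed(batch_results: List[Dict[str, Any]]) -> Dict[str, int]:
--     """Count the different types of forms needed"""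
--     return {key: sum(1 for result in batch_results
--                      if any(f in result.get('flags', []) for f in triggers))
--             for key, triggers in CATEGORIES.items()}
-- ===== Notes on version B (the rewrite author's own statement) =====
-- stated objective: idiomatic
-- what changed: Replaces the single mutable-counter loop with five conditional increments by a data-driven category table and a dict comprehension that counts each category with one sum-over-the-batch per key.
import Mathlib
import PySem

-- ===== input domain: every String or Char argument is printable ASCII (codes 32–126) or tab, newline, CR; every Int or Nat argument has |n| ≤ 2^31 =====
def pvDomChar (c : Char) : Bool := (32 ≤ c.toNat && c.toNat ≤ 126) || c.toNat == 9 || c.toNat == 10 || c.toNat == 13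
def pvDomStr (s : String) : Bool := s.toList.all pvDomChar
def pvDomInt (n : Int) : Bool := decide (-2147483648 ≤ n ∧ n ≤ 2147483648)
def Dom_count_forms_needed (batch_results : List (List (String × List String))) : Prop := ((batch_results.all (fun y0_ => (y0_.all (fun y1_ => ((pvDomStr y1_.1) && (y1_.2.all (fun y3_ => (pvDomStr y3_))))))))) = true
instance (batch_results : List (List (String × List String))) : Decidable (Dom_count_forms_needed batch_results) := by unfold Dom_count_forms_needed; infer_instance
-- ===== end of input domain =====

-- B replaces A's single mutable-counter loop by a category table and one count per key (idiomatic, same cost).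

-- ===== PORT A =====
-- one iteration of A's loop body: five conditional increments on the counts dict
def countFormsStepA (counts : PySem.Dict String Int) (result : List (String × List String)) :
    PySem.Dict String Int :=
  let flags := (PySem.Dict.mk result).getD "flags" []
  let counts := if flags.contains "MISSING_CHART_NOTES" then
      counts.modify "insurance_verification" 0 (· + 1) else counts
  let counts := if flags.contains "AUTHORIZATION_REQUIRED" then
      counts.modify "authorization_requests" 0 (· + 1) else counts
  let counts := if ["INSURANCE_NOT_ACCEPTED", "PROMINENCE_CONTRACT_ENDED"].any
      (fun f => flags.contains f) then counts.modify "uts_referrals" 0 (· + 1) else counts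
  let counts := if ["TITRATION_REQUIRES_CLINICAL_REVIEW", "CONTRADICTORY_INFO", "WRONG_TEST_ORDERED"].any
      (fun f => flags.contains f) then counts.modify "provider_followup" 0 (· + 1) else counts
  let counts := if flags.contains "MISSING_PATIENT_INFO" then
      counts.modify "patient_contact" 0 (· + 1) else counts
  counts

def count_forms_needed (batch_results : List (List (String × List String))) : List (String × Int) :=
  (batch_results.foldl countFormsStepA
    (PySem.Dict.mk [("insurance_verification", 0), ("authorization_requests", 0),
                    ("uts_referrals", 0), ("provider_followup", 0), ("patient_contact", 0)])).items

-- ===== PORT B =====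
-- CATEGORIES table from Source B
def pvCATEGORIES : List (String × List String) :=
  [("insurance_verification", ["MISSING_CHART_NOTES"]),
   ("authorization_requests", ["AUTHORIZATION_REQUIRED"]),
   ("uts_referrals", ["INSURANCE_NOT_ACCEPTED", "PROMINENCE_CONTRACT_ENDED"]),
   ("provider_followup", ["TITRATION_REQUIRES_CLINICAL_REVIEW", "CONTRADICTORY_INFO", "WRONG_TEST_ORDERED"]),
   ("patient_contact", ["MISSING_PATIENT_INFO"])]

-- sum(1 for result in batch_results if any(f in result.get('flags', []) for f in triggers))
def pvCatCount (batch_results : List (List (String × List String))) (triggers : List String) : Int :=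
  (batch_results.countP
    (fun result => triggers.any (fun f => ((PySem.Dict.mk result).getD "flags" []).contains f)) : Int)

def count_forms_needed_alt (batch_results : List (List (String × List String))) : List (String × Int) :=
  pvCATEGORIES.map (fun kt => (kt.1, pvCatCount batch_results kt.2))

-- ===== PRECONDITION & SPEC =====
def Spec_count_forms_needed (batch_results : List (List (String × List String))) (out : List (String × Int)) : Prop := out = count_forms_needed_alt batch_results
instance (batch_results : List (List (String × List String))) (out : List (String × Int)) : Decidable (Spec_count_forms_needed batch_results out) := by unfold Spec_count_forms_needed; infer_instance

-- ===== CLAIM (what is proved, stated in full; the proofs are below) =====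
def Claim_equal_count_forms_needed : Prop := ∀ (batch_results : List (List (String × List String))), Dom_count_forms_needed batch_results → Spec_count_forms_needed batch_results (count_forms_needed batch_results)

-- ===== LEMMAS AND PROOFS =====

-- the five membership predicates, per result
def pvP1 (r : List (String × List String)) : Bool := ((PySem.Dict.mk r).getD "flags" []).contains "MISSING_CHART_NOTES"
def pvP2 (r : List (String × List String)) : Bool := ((PySem.Dict.mk r).getD "flags" []).contains "AUTHORIZATION_REQUIRED"
def pvP3 (r : List (String × List String)) : Bool := ["INSURANCE_NOT_ACCEPTED", "PROMINENCE_CONTRACT_ENDED"].any (fun f => ((PySem.Dict.mk r).getD "flags" []).contains f)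
def pvP4 (r : List (String × List String)) : Bool := ["TITRATION_REQUIRES_CLINICAL_REVIEW", "CONTRADICTORY_INFO", "WRONG_TEST_ORDERED"].any (fun f => ((PySem.Dict.mk r).getD "flags" []).contains f)
def pvP5 (r : List (String × List String)) : Bool := ((PySem.Dict.mk r).getD "flags" []).contains "MISSING_PATIENT_INFO"

lemma countFormsStepA_eq (a b c d e : Int) (r : List (String × List String)) :
    countFormsStepA
      (PySem.Dict.mk [("insurance_verification", a), ("authorization_requests", b),
                      ("uts_referrals", c), ("provider_followup", d), ("patient_contact", e)]) r
  = PySem.Dict.mk [("insurance_verification", if pvP1 r then a + 1 else a),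
                   ("authorization_requests", if pvP2 r then b + 1 else b),
                   ("uts_referrals", if pvP3 r then c + 1 else c),
                   ("provider_followup", if pvP4 r then d + 1 else d),
                   ("patient_contact", if pvP5 r then e + 1 else e)] := by
  unfold countFormsStepA pvP1 pvP2 pvP3 pvP4 pvP5
  split_ifs <;> simp_all <;> rfl

lemma foldl_countFormsStepA (rs : List (List (String × List String))) (a b c d e : Int) :
    rs.foldl countFormsStepA
      (PySem.Dict.mk [("insurance_verification", a), ("authorization_requests", b),
                      ("uts_referrals", c), ("provider_followup", d), ("patient_contact", e)])
  = PySem.Dict.mk [("insurance_verification", a + (rs.countP pvP1 : Int)),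
                   ("authorization_requests", b + (rs.countP pvP2 : Int)),
                   ("uts_referrals", c + (rs.countP pvP3 : Int)),
                   ("provider_followup", d + (rs.countP pvP4 : Int)),
                   ("patient_contact", e + (rs.countP pvP5 : Int))] := by
  induction rs generalizing a b c d e with
  | nil => simp
  | cons r rs ih =>
    rw [List.foldl_cons, countFormsStepA_eq, ih]
    simp only [List.countP_cons, PySem.Dict.mk.injEq, List.cons.injEq, Prod.mk.injEq,
      true_and, and_true]
    refine ⟨?_, ?_, ?_, ?_, ?_⟩ <;> (split_ifs <;> push_cast <;> ring)

theorem count_forms_needed_eq (batch_results : List (List (String × List String))) :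
    count_forms_needed batch_results = count_forms_needed_alt batch_results := by
  unfold count_forms_needed count_forms_needed_alt
  rw [foldl_countFormsStepA]
  simp only [pvCATEGORIES, List.map]
  unfold pvCatCount pvP1 pvP2 pvP3 pvP4 pvP5
  norm_num

-- ===== VERDICT (by name: the statement is the Claim_ definition above) =====
theorem count_forms_needed_spec : Claim_equal_count_forms_needed := by
  intro batch_results _
  exact count_forms_needed_eq batch_results
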